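-- pv_equiv track=rewrite | github.com/ice0624/CUS1188-Coursework | SpectralClustering.py | createDD
-- ===== SOURCE A (Python) =====
-- def createDD(adj, nodes):
--     D = []
--     for a in range(nodes):
--         D.append([])
--         for b in range(nodes):
--             if a == b:
--                 D[a].append(sum(adj[a]))
--             else:
--                 D[a].append(0)
--     return D
-- ===== SOURCE B (Python) =====
-- def createDD(adj, nodes):
--     zeros = [0] * nodes
--     return [zeros[:k] + [sum(adj[k])] + zeros[k + 1:] for k in range(nodes)]
-- ===== Notes on version B (the rewrite author's own statement) =====
-- stated objective: simpler
-- what changed: Removes the inner loop and per-cell a==b branch entirely: B precomputes one shared zero row and assembles each row by slicing it around the row sum (zeros[:k] + [sum(adj[k])] + zeros[k+1:]) in a single comprehension.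
import Mathlib
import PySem

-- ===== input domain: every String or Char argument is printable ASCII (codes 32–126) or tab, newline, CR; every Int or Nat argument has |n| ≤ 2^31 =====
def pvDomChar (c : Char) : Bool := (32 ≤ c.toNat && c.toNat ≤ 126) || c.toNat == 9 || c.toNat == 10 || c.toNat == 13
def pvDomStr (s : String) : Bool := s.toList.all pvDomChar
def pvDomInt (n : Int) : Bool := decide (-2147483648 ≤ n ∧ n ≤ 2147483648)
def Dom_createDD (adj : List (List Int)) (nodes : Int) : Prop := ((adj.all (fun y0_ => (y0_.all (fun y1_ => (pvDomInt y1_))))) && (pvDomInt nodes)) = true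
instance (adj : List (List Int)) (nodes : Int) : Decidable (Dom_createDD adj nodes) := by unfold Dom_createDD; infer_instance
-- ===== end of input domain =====

-- B removes A's inner loop and per-cell a == b branch: it slices one shared zero row
-- around each row sum inside a single comprehension; objective: simpler.


-- ===== PORT A =====
-- for a in range(nodes): D.append([]); for b in range(nodes): D[a].append(sum(adj[a]) if a==b else 0)
-- adj[a] is ported with pyGetD, exact under Pre_ (a < len(adj) for every a in range(nodes)).
def createDD (adj : List (List Int)) (nodes : Int) : List (List Int) :=
  (PySem.List.pyRange 0 nodes 1).foldl
    (fun D a =>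
      D ++ [(PySem.List.pyRange 0 nodes 1).foldl
        (fun row b => row ++ [if a == b then (PySem.List.pyGetD adj a []).sum else 0]) []])
    []

-- ===== PORT B =====
-- zeros = [0] * nodes   ([0]*nodes = List.replicate nodes.toNat 0, exact: negative nodes gives [])
-- [zeros[:k] + [sum(adj[k])] + zeros[k+1:] for k in range(nodes)]   (slices via PySem.List.slice,
-- adj[k] via pyGetD, exact under Pre_)
def createDD_alt (adj : List (List Int)) (nodes : Int) : List (List Int) :=
  let zeros := List.replicate nodes.toNat (0 : Int)
  (PySem.List.pyRange 0 nodes 1).map (fun k =>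
    PySem.List.slice zeros none (some k) ++
      [(PySem.List.pyGetD adj k []).sum] ++
      PySem.List.slice zeros (some (k + 1)) none)

-- ===== PRECONDITION & SPEC =====
-- Pre_ excludes exactly the inputs where Python A raises IndexError on adj[a]: nodes > len(adj).
def Pre_createDD (adj : List (List Int)) (nodes : Int) : Prop := nodes ≤ (adj.length : Int)
instance (adj : List (List Int)) (nodes : Int) : Decidable (Pre_createDD adj nodes) := by unfold Pre_createDD; infer_instance
def pvWitness_createDD : List (List Int) × Int := ([[1, 2], [3, -4], [5]], 3)

def Spec_createDD (adj : List (List Int)) (nodes : Int) (out : List (List Int)) : Prop := out = createDD_alt adj nodes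
instance (adj : List (List Int)) (nodes : Int) (out : List (List Int)) : Decidable (Spec_createDD adj nodes out) := by unfold Spec_createDD; infer_instance

-- ===== CLAIM (what is proved, stated in full; the proofs are below) =====
def Claim_equal_createDD : Prop := ∀ (adj : List (List Int)) (nodes : Int), Dom_createDD adj nodes → Pre_createDD adj nodes → Spec_createDD adj nodes (createDD adj nodes)

-- ===== LEMMAS AND PROOFS =====

-- A's nested append-loops as a nested map over range(nodes)
theorem createDD_eq_map (adj : List (List Int)) (nodes : Int) :
    createDD adj nodes =
      (List.range nodes.toNat).map (fun (a : Nat) =>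
        (List.range nodes.toNat).map (fun (b : Nat) =>
          if ((a : Int) == (b : Int)) then (adj.getD a []).sum else 0)) := by
  unfold createDD
  rw [PySem.List.pyRange_zero, List.foldl_map, PySem.List.foldl_append_singleton_eq_map]
  simp only [List.nil_append]
  refine List.map_congr_left (fun a _ => ?_)
  rw [List.foldl_map, PySem.List.foldl_append_singleton_eq_map, List.nil_append,
    PySem.List.pyGetD_natCast]

-- the row A builds for index a equals a sliced zero row with v in the middle
theorem row_eq_block (n a : Nat) (v : Int) (ha : a < n) :
    (List.range n).map (fun (b : Nat) => if ((a : Int) == (b : Int)) then v else 0)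
      = List.replicate a (0 : Int) ++ v :: List.replicate (n - (a + 1)) (0 : Int) := by
  apply List.ext_getElem?
  intro i
  by_cases hi : i < n
  · rw [List.getElem?_map, List.getElem?_range hi]
    rcases lt_trichotomy i a with h | h | h
    · rw [List.getElem?_append_left (by simpa using h), List.getElem?_replicate, if_pos h]
      simp only [beq_iff_eq, Int.natCast_inj]
      simp only [Option.map_some]
      rw [if_neg (by omega)]
    · subst h
      rw [List.getElem?_append_right (by simp), List.length_replicate, Nat.sub_self]
      simp
    · rw [List.getElem?_append_right (by simp; omega), List.length_replicate]
      have hpos : 0 < i - a := by omega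
      rw [List.getElem?_cons, if_neg (by omega)]
      rw [List.getElem?_replicate, if_pos (by omega)]
      simp only [beq_iff_eq, Int.natCast_inj]
      simp only [Option.map_some]
      rw [if_neg (by omega)]
  · rw [List.getElem?_eq_none (by simpa using Nat.le_of_not_lt hi),
      List.getElem?_eq_none (by simp; omega)]

-- ===== VERDICT (by name: the statement is the Claim_ definition above) =====
theorem createDD_spec : Claim_equal_createDD := by
  intro adj nodes _ _
  unfold Spec_createDD
  rw [createDD_eq_map]
  unfold createDD_alt
  simp only [PySem.List.pyRange_zero, List.map_map, Function.comp_def,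
    PySem.List.pyGetD_natCast]
  refine List.map_congr_left (fun a ha => ?_)
  have ha' : a < nodes.toNat := List.mem_range.mp ha
  rw [row_eq_block _ _ _ ha']
  rw [PySem.List.slice_to_natCast, List.take_replicate,
    show ((a : Int) + 1) = (((a + 1 : Nat) : Int)) by push_cast; ring,
    PySem.List.slice_from_natCast, List.drop_replicate]
  rw [Nat.min_eq_left (le_of_lt ha')]
  simp
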